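-- pv_equiv track=rewrite | github.com/pypi-data/pypi-mirror-99 | packages/appy/appy-1.0.6.tar.gz/appy-1.0.6/py3/appy/utils/string.py | sremove
-- ===== SOURCE A (Python) =====
-- def sremove(s, sub, sep=' '):
--     '''Removes sub-string p_sub from p_s, which is a list of sub-strings
--        separated by p_sep, and returns the updated string.'''
--     if not sub: return s
--     if not s: return s
--     r = s.split(sep)
--     for part in sub.split(sep):
--         if part in r:
--             r.remove(part)
--     return sep.join(r)
-- ===== SOURCE B (Python) =====
-- def sremove(s, sub, sep=' '):
--     '''Removes sub-string p_sub from p_s, which is a list of sub-strings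
--        separated by p_sep, and returns the updated string.'''
--     if not sub: return s
--     if not s: return s
--     budget = {}
--     for t in sub.split(sep):
--         budget[t] = budget.get(t, 0) + 1
--     kept = []
--     for x in s.split(sep):
--         if budget.get(x, 0) > 0:
--             budget[x] = budget[x] - 1
--         else:
--             kept.append(x)
--     return sep.join(kept)
-- ===== Notes on version B (the rewrite author's own statement) =====
-- stated objective: alternative
-- what changed: Instead of looping over sub's tokens and mutating the parts list with repeated membership tests and list.remove scans, B counts sub's tokens once into a dict and makes a single budgeted pass over s's parts, skipping each part while its budget lasts.
import Mathlib
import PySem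

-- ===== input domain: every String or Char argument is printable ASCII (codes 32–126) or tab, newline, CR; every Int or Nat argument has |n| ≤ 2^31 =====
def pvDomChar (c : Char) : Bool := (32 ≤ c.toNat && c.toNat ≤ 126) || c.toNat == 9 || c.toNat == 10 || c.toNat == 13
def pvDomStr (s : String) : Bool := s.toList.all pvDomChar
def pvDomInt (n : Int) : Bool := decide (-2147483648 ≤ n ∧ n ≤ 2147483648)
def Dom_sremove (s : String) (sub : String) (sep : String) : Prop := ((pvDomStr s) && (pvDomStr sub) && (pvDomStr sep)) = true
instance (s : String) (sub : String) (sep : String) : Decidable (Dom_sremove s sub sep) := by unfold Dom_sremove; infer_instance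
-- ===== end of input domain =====

-- B replaces A's per-token `list.remove` scans by one counting pass over sub and one
-- budgeted pass over s's parts (objective: simpler single-pass algorithm).

-- ===== PORT A =====
def sremove (s : String) (sub : String) (sep : String) : String :=
  if sub = "" then s
  else if s = "" then s
  else
    match PySem.Str.split? s sep, PySem.Str.split? sub sep with
    | some r0, some parts =>
        -- for part in sub.split(sep): if part in r: r.remove(part)
        let r := parts.foldl
          (fun r part => if r.contains part then (PySem.List.remove? r part).getD r else r) r0
        PySem.Str.join sep r
    | _, _ => s  -- sep = "": Python raises ValueError; excluded by Pre_sremove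

-- ===== PORT B =====
def sremove_alt (s : String) (sub : String) (sep : String) : String :=
  if sub = "" then s
  else if s = "" then s
  else
    match PySem.Str.split? s sep with
    | none => s  -- sep = "": Python raises ValueError; excluded by Pre_sremove
    | some xs =>
      match PySem.Str.split? sub sep with
      | none => s
      | some ts =>
        -- budget = {}; for t in ts: budget[t] = budget.get(t,0)+1
        let budget : PySem.Dict String Int :=
          ts.foldl (fun d t => d.modify t 0 (· + 1)) PySem.Dict.empty
        -- kept = []; for x in xs: if budget.get(x,0) > 0: budget[x] -= 1 else: kept.append(x)
        let fin := xs.foldl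
          (fun (st : PySem.Dict String Int × List String) x =>
            if st.1.getD x 0 > 0 then (st.1.modify x 0 (· - 1), st.2)
            else (st.1, st.2 ++ [x]))
          (budget, [])
        PySem.Str.join sep fin.2

-- ===== PRECONDITION & SPEC =====
-- Pre_ excludes exactly the inputs where Python A raises ValueError: an empty separator
-- reached by split (i.e. sep = "" with both s and sub non-empty).
def Pre_sremove (s : String) (sub : String) (sep : String) : Prop :=
  sub = "" ∨ s = "" ∨ sep ≠ ""
instance (s : String) (sub : String) (sep : String) : Decidable (Pre_sremove s sub sep) := by
  unfold Pre_sremove; infer_instance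

def pvWitness_sremove : String × String × String := ("a b c b", "b x", " ")

def Spec_sremove (s : String) (sub : String) (sep : String) (out : String) : Prop := out = sremove_alt s sub sep
instance (s : String) (sub : String) (sep : String) (out : String) : Decidable (Spec_sremove s sub sep out) := by unfold Spec_sremove; infer_instance

-- ===== CLAIM (what is proved, stated in full; the proofs are below) =====
def Claim_equal_sremove : Prop := ∀ (s : String) (sub : String) (sep : String), Dom_sremove s sub sep → Pre_sremove s sub sep → Spec_sremove s sub sep (sremove s sub sep)

-- ===== LEMMAS AND PROOFS =====

-- A's loop over sub's parts, abstracted over the list of parts.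
def pvLoopA (r : List String) (ts : List String) : List String :=
  ts.foldl (fun r part => if r.contains part then (PySem.List.remove? r part).getD r else r) r

-- B's kept-list, with the budget abstracted to a function String → Int.
def pvKeep (f : String → Int) : List String → List String
  | [] => []
  | x :: xs =>
      if f x > 0 then pvKeep (fun v => if v = x then f v - 1 else f v) xs
      else x :: pvKeep f xs

lemma pvKeep_congr (f g : String → Int) (xs : List String) (h : ∀ v, f v = g v) :
    pvKeep f xs = pvKeep g xs := by
  induction xs generalizing f g with
  | nil => rfl
  | cons x xs ih =>
    simp only [pvKeep, h x]
    split_ifs with hx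
    · exact ih _ _ (fun v => by by_cases hv : v = x <;> simp [hv, h v, h x])
    · exact congrArg _ (ih _ _ h)

lemma pvKeep_nonpos (f : String → Int) (xs : List String) (h : ∀ v, f v ≤ 0) :
    pvKeep f xs = xs := by
  induction xs with
  | nil => rfl
  | cons x xs ih =>
    have : ¬ f x > 0 := by have := h x; omega
    simp [pvKeep, this, ih]

-- one bump of the budget corresponds to one guarded `remove` step of A
lemma pvKeep_bump (t : String) (f : String → Int) (hf : ∀ v, 0 ≤ f v) (r : List String) :
    pvKeep (fun v => if v = t then f v + 1 else f v) r
      = pvKeep f (if r.contains t then (PySem.List.remove? r t).getD r else r) := by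
  induction r generalizing f with
  | nil => simp [pvKeep]
  | cons x xs ih =>
    by_cases hx : x = t
    · subst hx
      have hpos : f x + 1 > 0 := by have := hf x; omega
      simp only [pvKeep, hpos, if_pos, List.contains_cons, BEq.rfl, Bool.true_or,
        PySem.List.remove?_cons_self, Option.getD_some]
      exact pvKeep_congr _ _ _ (fun v => by by_cases hv : v = x <;> simp [hv])
    · have hcons : (if (x :: xs).contains t then (PySem.List.remove? (x :: xs) t).getD (x :: xs) else x :: xs)
          = x :: (if xs.contains t then (PySem.List.remove? xs t).getD xs else xs) := by
        by_cases hm : t ∈ xs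
        · have hsome : PySem.List.remove? xs t ≠ none := by
            simp [PySem.List.remove?_eq_none_iff, hm]
          obtain ⟨ys, hys⟩ := Option.ne_none_iff_exists'.mp hsome
          simp [hm, Ne.symm hx, PySem.List.remove?_cons_of_ne xs hx, hys]
        · simp [hm, Ne.symm hx]
      rw [hcons]
      by_cases hfx : f x > 0
      · have hfx' : (if x = t then f x + 1 else f x) > 0 := by simp [hx, hfx]
        simp only [pvKeep, hfx', if_pos, hfx]
        have hnn : ∀ v, 0 ≤ (fun v => if v = x then f v - 1 else f v) v := by
          intro v
          by_cases hv : v = x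
          · subst hv; simp; omega
          · simp [hv]; exact hf v
        rw [← ih (f := fun v => if v = x then f v - 1 else f v) hnn]
        exact pvKeep_congr _ _ _ (fun v => by
          by_cases hv1 : v = x <;> by_cases hv2 : v = t <;> simp [hv1, hv2] <;> simp_all)
      · have hfx' : ¬ (if x = t then f x + 1 else f x) > 0 := by simp [hx, hfx]
        simp only [pvKeep, hfx', hfx]
        exact congrArg (List.cons x) (ih f hf)

-- A's whole loop equals the budgeted filter with budget = occurrence counts of ts
lemma pvLoopA_eq_keep (ts r : List String) :
    pvLoopA r ts = pvKeep (fun v => (ts.count v : Int)) r := by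
  induction ts generalizing r with
  | nil =>
    simp only [pvLoopA, List.foldl_nil]
    exact (pvKeep_nonpos _ _ (fun v => by simp)).symm
  | cons t ts ih =>
    simp only [pvLoopA, List.foldl_cons] at *
    rw [ih]
    rw [← pvKeep_bump t (fun v => (ts.count v : Int)) (fun v => by positivity) r]
    exact pvKeep_congr _ _ _ (fun v => by
      by_cases hv : v = t
      · subst hv; simp
      · simp [hv, Ne.symm hv])

-- B's foldl produces acc ++ (budgeted filter through the dict)
lemma pvFoldB (xs : List String) (d : PySem.Dict String Int) (acc : List String) :
    (xs.foldl
      (fun (st : PySem.Dict String Int × List String) x =>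
        if st.1.getD x 0 > 0 then (st.1.modify x 0 (· - 1), st.2)
        else (st.1, st.2 ++ [x]))
      (d, acc)).2 = acc ++ pvKeep (fun v => d.getD v 0) xs := by
  induction xs generalizing d acc with
  | nil => simp [pvKeep]
  | cons x xs ih =>
    by_cases hx : d.getD x 0 > 0
    · simp only [List.foldl_cons, hx, if_pos, pvKeep]
      rw [ih]
      exact congrArg _ (pvKeep_congr _ _ _ (fun v => by
        rw [PySem.Dict.getD_modify]
        by_cases hv : v = x <;> simp [hv]))
    · simp only [List.foldl_cons, hx, if_neg, pvKeep, not_false_iff]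
      rw [ih]
      simp

-- ===== VERDICT (by name: the statement is the Claim_ definition above) =====
theorem sremove_spec : Claim_equal_sremove := by
  intro s sub sep _ _
  unfold Spec_sremove sremove sremove_alt
  by_cases hsub : sub = ""
  · simp [hsub]
  · by_cases hs : s = ""
    · simp [hsub, hs]
    · simp only [hsub, hs, if_neg, not_false_iff]
      cases hr : PySem.Str.split? s sep with
      | none => cases ht : PySem.Str.split? sub sep <;> rfl
      | some r0 =>
        cases ht : PySem.Str.split? sub sep with
        | none => rfl
        | some ts =>
          simp only
          congr 1
          rw [pvFoldB, List.nil_append, ← PySem.Dict.counter_eq_foldl]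
          have hA := pvLoopA_eq_keep ts r0
          unfold pvLoopA at hA
          rw [hA]
          exact pvKeep_congr _ _ _ (fun v => by rw [PySem.Dict.getD_counter])
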